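-- pv_equiv track=rewrite | github.com/dmarsters/sitcom-character-styles | framework/core/continuous_deformation.py | _extract_objects
-- ===== SOURCE A (Python) =====
-- from typing import Dict, List, Any
--
-- def _extract_objects(prompt: str) -> List[str]:
--     """Extract notable objects mentioned (excluding those already in subject)."""
--     objects = []
--     object_keywords = [
--         "cup", "bottle", "glass", "table", "chair", "book",
--         "flower", "plant", "lamp", "window", "door", "painting", "mirror",
--         "knife", "fork", "plate", "bowl", "pot", "pan", "mug"
--     ]
--
--     prompt_lower = prompt.lower()
--     # Common compound noun adjectives that shouldn't be double-counted
--     adjective_nouns = ["coffee", "soup", "wine", "water", "tea", "beer", "milk"]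
--
--     for obj in object_keywords:
--         if obj in prompt_lower:
--             # Don't add if it's part of a compound noun (preceded by adjective)
--             skip = False
--             for adj in adjective_nouns:
--                 if f"{adj} {obj}" in prompt_lower:
--                     skip = True
--                     break
--
--             if not skip:
--                 objects.append(obj)
--
--     return objects
-- ===== SOURCE B (Python) =====
-- def _extract_objects(prompt):
--     """Extract notable objects mentioned (excluding those already in subject)."""
--     object_keywords = [
--         "cup", "bottle", "glass", "table", "chair", "book",
--         "flower", "plant", "lamp", "window", "door", "painting", "mirror",
--         "knife", "fork", "plate", "bowl", "pot", "pan", "mug"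
--     ]
--     adjective_nouns = ["coffee", "soup", "wine", "water", "tea", "beer", "milk"]
--     pl = prompt.lower()
--     # Text-driven sweep: walk every position of the prompt once; at each position
--     # record which keywords start there ("found") and which keywords start right
--     # after an adjective+space there ("blocked"), then filter the keyword list.
--     found = set()
--     blocked = set()
--     for i in range(len(pl) + 1):
--         for obj in object_keywords:
--             if pl.startswith(obj, i):
--                 found.add(obj)
--         for adj in adjective_nouns:
--             if pl.startswith(adj + " ", i):
--                 j = i + len(adj) + 1
--                 for obj in object_keywords:
--                     if pl.startswith(obj, j):
--                         blocked.add(obj)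
--     return [obj for obj in object_keywords if obj in found and obj not in blocked]
-- ===== Notes on version B (the rewrite author's own statement) =====
-- stated objective: alternative
-- what changed: Replaces A's pattern-driven substring searches (each keyword searched in the prompt, with a per-keyword inner adjective scan) by a text-driven sweep: one pass over every position of the lowered prompt recording which keywords match there and which match right after an adjective+space, then a final filter of the keyword list against the two recorded sets.
import Mathlib
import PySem

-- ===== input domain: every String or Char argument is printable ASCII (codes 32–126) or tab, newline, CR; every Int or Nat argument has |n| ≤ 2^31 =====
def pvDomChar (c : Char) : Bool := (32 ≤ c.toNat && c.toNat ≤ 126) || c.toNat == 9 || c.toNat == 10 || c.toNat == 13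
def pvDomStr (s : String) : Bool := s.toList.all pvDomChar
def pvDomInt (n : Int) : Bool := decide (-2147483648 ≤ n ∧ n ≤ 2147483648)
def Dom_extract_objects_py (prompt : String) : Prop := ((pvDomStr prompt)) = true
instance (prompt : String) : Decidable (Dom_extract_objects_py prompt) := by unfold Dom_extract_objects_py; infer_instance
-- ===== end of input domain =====

-- B replaces A's pattern-driven substring searches by a text-driven sweep over every
-- position of the lowered prompt (recording matched and compound-blocked keywords in
-- two sets), then filters the keyword list once; alternative algorithm, same results.

def pvKeywords : List String :=
  ["cup", "bottle", "glass", "table", "chair", "book",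
   "flower", "plant", "lamp", "window", "door", "painting", "mirror",
   "knife", "fork", "plate", "bowl", "pot", "pan", "mug"]

def pvAdjectives : List String :=
  ["coffee", "soup", "wine", "water", "tea", "beer", "milk"]

-- ===== PORT A =====
def extract_objects_py (prompt : String) : List String :=
  let prompt_lower := PySem.Str.lower prompt
  pvKeywords.foldl (fun objects obj =>
    if PySem.Str.isIn obj prompt_lower then
      -- inner for-with-break computing `skip`
      let skip := pvAdjectives.any (fun adj => PySem.Str.isIn (adj ++ " " ++ obj) prompt_lower)
      if !skip then objects ++ [obj] else objects
    else objects) []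

-- ===== PORT B =====
-- Python's `pl.startswith(w, i)` is exactly `w.toList.isPrefixOf (pl.toList.drop i)`
-- (prefix test of the suffix starting at i; i ranges over 0..len(pl) here, no clamping needed),
-- and `len(adj)` is `adj.toList.length`.
def extract_objects_py_alt (prompt : String) : List String :=
  let pl := (PySem.Str.lower prompt).toList
  let fb := (List.range (pl.length + 1)).foldl (fun fb i =>
      (pvKeywords.foldl (fun f obj =>
         if obj.toList.isPrefixOf (pl.drop i) then PySem.Set.add f obj else f) fb.1,
       pvAdjectives.foldl (fun b adj =>
         if (adj.toList ++ [' ']).isPrefixOf (pl.drop i) then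
           pvKeywords.foldl (fun b obj =>
             if obj.toList.isPrefixOf (pl.drop (i + adj.toList.length + 1)) then
               PySem.Set.add b obj else b) b
         else b) fb.2))
    (PySem.Set.empty, PySem.Set.empty)
  pvKeywords.filter (fun obj => PySem.Set.contains fb.1 obj && !(PySem.Set.contains fb.2 obj))

-- ===== PRECONDITION & SPEC =====
def Spec_extract_objects_py (prompt : String) (out : List String) : Prop := out = extract_objects_py_alt prompt
instance (prompt : String) (out : List String) : Decidable (Spec_extract_objects_py prompt out) := by unfold Spec_extract_objects_py; infer_instance

-- ===== CLAIM (what is proved, stated in full; the proofs are below) =====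
def Claim_equal_extract_objects_py : Prop := ∀ (prompt : String), Dom_extract_objects_py prompt → Spec_extract_objects_py prompt (extract_objects_py prompt)

-- ===== LEMMAS AND PROOFS =====

-- A's append-if loop is a filter.
theorem pv_foldl_filter (P Q : String → Bool) (ks : List String) (acc : List String) :
    ks.foldl (fun objects obj =>
      if P obj then (if !(Q obj) then objects ++ [obj] else objects) else objects) acc
      = acc ++ ks.filter (fun o => P o && !(Q o)) := by
  induction ks generalizing acc with
  | nil => simp
  | cons h t ih =>
    rw [List.foldl_cons, List.filter_cons]
    cases hP : P h <;> cases hQ : Q h <;>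
      simp only [Bool.not_true, Bool.not_false, Bool.true_and, Bool.false_and,
        reduceIte] <;> rw [ih] <;> simp

-- membership after an add-if pass over a list
theorem pv_mem_addIf (c : String → Bool) (ks : List String) (s : PySem.Set String) (x : String) :
    x ∈ ks.foldl (fun s o => if c o then PySem.Set.add s o else s) s
      ↔ x ∈ s ∨ (x ∈ ks ∧ c x = true) := by
  induction ks generalizing s with
  | nil => simp
  | cons h t ih =>
    simp only [List.foldl_cons]
    by_cases hc : c h
    · rw [if_pos hc, ih]
      simp only [PySem.Set.mem_add, List.mem_cons]
      constructor
      · rintro (⟨hs | hx⟩ | ht)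
        · exact Or.inl hs
        · exact Or.inr ⟨Or.inl hx, hx ▸ hc⟩
        · exact Or.inr ⟨Or.inr ht.1, ht.2⟩
      · rintro (hs | ⟨hx | ht, hcx⟩)
        · exact Or.inl (Or.inl hs)
        · exact Or.inl (Or.inr hx)
        · exact Or.inr ⟨ht, hcx⟩
    · rw [if_neg hc, ih]
      simp only [List.mem_cons]
      constructor
      · rintro (hs | ht)
        · exact Or.inl hs
        · exact Or.inr ⟨Or.inr ht.1, ht.2⟩
      · rintro (hs | ⟨rfl | ht, hcx⟩)
        · exact Or.inl hs
        · exact absurd hcx hc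
        · exact Or.inr ⟨ht, hcx⟩

-- membership after a fold whose step's additions are characterised by Q
theorem pv_mem_foldl {ι : Type} (step : PySem.Set String → ι → PySem.Set String)
    (Q : ι → String → Prop) (x : String)
    (h : ∀ s i, x ∈ step s i ↔ x ∈ s ∨ Q i x)
    (idxs : List ι) (s : PySem.Set String) :
    x ∈ idxs.foldl step s ↔ x ∈ s ∨ ∃ i ∈ idxs, Q i x := by
  induction idxs generalizing s with
  | nil => simp
  | cons a t ih =>
    simp only [List.foldl_cons]
    rw [ih, h]
    simp only [List.mem_cons]
    constructor
    · rintro ((hs | hq) | ⟨i, hi, hqi⟩)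
      · exact Or.inl hs
      · exact Or.inr ⟨a, Or.inl rfl, hq⟩
      · exact Or.inr ⟨i, Or.inr hi, hqi⟩
    · rintro (hs | ⟨i, (rfl | hi), hqi⟩)
      · exact Or.inl (Or.inl hs)
      · exact Or.inl (Or.inr hqi)
      · exact Or.inr ⟨i, hi, hqi⟩

-- a prefix test of a concatenation splits at the seam
theorem pv_prefix_append_iff (u v l : List Char) :
    (u ++ v) <+: l ↔ u <+: l ∧ v <+: l.drop u.length := by
  induction u generalizing l with
  | nil => simp
  | cons a u ih =>
    cases l with
    | nil => simp
    | cons b t =>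
      simp only [List.cons_append, List.cons_prefix_cons, List.length_cons,
        List.drop_succ_cons, ih, and_assoc]

-- a bounded position sweep finds a pattern iff `pat in l`
theorem pv_exists_range_prefix (pat l : List Char) :
    (∃ i ∈ List.range (l.length + 1), pat <+: l.drop i) ↔ PySem.Chars.isIn pat l = true := by
  rw [← PySem.Chars.exists_prefix_drop_iff_isIn]
  constructor
  · rintro ⟨i, _, hp⟩; exact ⟨i, hp⟩
  · rintro ⟨j, hp⟩
    by_cases hj : j ≤ l.length
    · exact ⟨j, List.mem_range.mpr (Nat.lt_succ_of_le hj), hp⟩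
    · have hnil : l.drop j = [] := List.drop_eq_nil_of_le (by omega)
      have hpat : pat = [] := List.prefix_nil.mp (hnil ▸ hp)
      exact ⟨l.length, List.mem_range.mpr (Nat.lt_succ_self _),
        hpat ▸ List.nil_prefix⟩

-- ===== VERDICT (by name: the statement is the Claim_ definition above) =====
set_option maxHeartbeats 1600000 in
theorem extract_objects_py_spec : Claim_equal_extract_objects_py := by
  intro prompt _
  unfold Spec_extract_objects_py extract_objects_py extract_objects_py_alt
  set pls := PySem.Str.lower prompt with hpls
  set pl := pls.toList with hpl
  rw [pv_foldl_filter (fun obj => PySem.Str.isIn obj pls)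
        (fun obj => pvAdjectives.any (fun adj => PySem.Str.isIn (adj ++ " " ++ obj) pls)) pvKeywords []]
  simp only [List.nil_append]
  rw [PySem.List.foldl_prod_mk
      (f := fun f i => pvKeywords.foldl (fun f obj =>
        if obj.toList.isPrefixOf (pl.drop i) then PySem.Set.add f obj else f) f)
      (g := fun b i => pvAdjectives.foldl (fun b adj =>
        if (adj.toList ++ [' ']).isPrefixOf (pl.drop i) then
          pvKeywords.foldl (fun b obj =>
            if obj.toList.isPrefixOf (pl.drop (i + adj.toList.length + 1)) then
              PySem.Set.add b obj else b) b
        else b) b)]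
  apply List.filter_congr
  intro x hx
  -- found component
  have hfound : PySem.Set.contains
      ((List.range (pl.length + 1)).foldl (fun f i => pvKeywords.foldl (fun f obj =>
        if obj.toList.isPrefixOf (pl.drop i) then PySem.Set.add f obj else f) f)
        PySem.Set.empty) x
      = PySem.Str.isIn x pls := by
    rw [Bool.eq_iff_iff, PySem.Set.contains_iff,
      pv_mem_foldl _ (fun i y => y ∈ pvKeywords ∧ y.toList.isPrefixOf (pl.drop i) = true) x
        (fun s i => pv_mem_addIf _ pvKeywords s x)]
    simp only [PySem.Set.empty, List.not_mem_nil, false_or, List.isPrefixOf_iff_prefix]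
    rw [PySem.Str.isIn_iff_infix, ← hpl, ← PySem.Chars.isIn_iff_infix,
      ← pv_exists_range_prefix]
    constructor
    · rintro ⟨i, hi, _, hp⟩; exact ⟨i, hi, hp⟩
    · rintro ⟨i, hi, hp⟩; exact ⟨i, hi, hx, hp⟩
  -- blocked component
  have hblocked : PySem.Set.contains
      ((List.range (pl.length + 1)).foldl (fun b i => pvAdjectives.foldl (fun b adj =>
        if (adj.toList ++ [' ']).isPrefixOf (pl.drop i) then
          pvKeywords.foldl (fun b obj =>
            if obj.toList.isPrefixOf (pl.drop (i + adj.toList.length + 1)) then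
              PySem.Set.add b obj else b) b
        else b) b)
        PySem.Set.empty) x
      = pvAdjectives.any (fun adj => PySem.Str.isIn (adj ++ " " ++ x) pls) := by
    rw [Bool.eq_iff_iff, PySem.Set.contains_iff,
      pv_mem_foldl _ (fun i y => ∃ adj ∈ pvAdjectives,
          (adj.toList ++ [' ']).isPrefixOf (pl.drop i) = true ∧ y ∈ pvKeywords ∧
            y.toList.isPrefixOf (pl.drop (i + adj.toList.length + 1)) = true) x ?hstep]
    case hstep =>
      intro s i
      rw [pv_mem_foldl _ (fun adj y =>
            (adj.toList ++ [' ']).isPrefixOf (pl.drop i) = true ∧ y ∈ pvKeywords ∧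
              y.toList.isPrefixOf (pl.drop (i + adj.toList.length + 1)) = true) x ?_]
      intro s' adj
      by_cases hg : (adj.toList ++ [' ']).isPrefixOf (pl.drop i) = true
      · rw [if_pos hg, pv_mem_addIf _ pvKeywords s' x]
        simp [hg]
      · rw [if_neg hg]
        simp [hg]
    simp only [PySem.Set.empty, List.not_mem_nil, false_or, List.isPrefixOf_iff_prefix,
      List.any_eq_true]
    constructor
    · rintro ⟨i, hi, adj, hadj, hg, _, hp⟩
      refine ⟨adj, hadj, ?_⟩
      rw [PySem.Str.isIn_iff_infix, ← hpl]
      have hcat : (adj ++ " " ++ x).toList = (adj.toList ++ [' ']) ++ x.toList := by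
        simp [String.toList_append]
      rw [hcat, ← PySem.Chars.isIn_iff_infix, ← pv_exists_range_prefix]
      refine ⟨i, hi, ?_⟩
      rw [pv_prefix_append_iff]
      refine ⟨hg, ?_⟩
      have : (pl.drop i).drop (adj.toList ++ [' ']).length = pl.drop (i + adj.toList.length + 1) := by
        rw [List.drop_drop]
        congr 1
        simp only [List.length_append, List.length_cons, List.length_nil]
        omega
      rw [this]; exact hp
    · rintro ⟨adj, hadj, hIn⟩
      rw [PySem.Str.isIn_iff_infix, ← hpl] at hIn
      have hcat : (adj ++ " " ++ x).toList = (adj.toList ++ [' ']) ++ x.toList := by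
        simp [String.toList_append]
      rw [hcat, ← PySem.Chars.isIn_iff_infix, ← pv_exists_range_prefix] at hIn
      obtain ⟨i, hi, hp⟩ := hIn
      rw [pv_prefix_append_iff] at hp
      refine ⟨i, hi, adj, hadj, hp.1, hx, ?_⟩
      have : (pl.drop i).drop (adj.toList ++ [' ']).length = pl.drop (i + adj.toList.length + 1) := by
        rw [List.drop_drop]
        congr 1
        simp only [List.length_append, List.length_cons, List.length_nil]
        omega
      rw [← this]; exact hp.2
  rw [hfound, hblocked]
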